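-- pv_equiv track=rewrite | github.com/lwzzzzzzzz/Solution | SpaceForTime/hash/盒子不取出放球问题.py | min_ball_cnt
-- ===== SOURCE A (Python) =====
-- def min_ball_cnt(boxes):
--     m = set()
--     res = 0
--     m.add(boxes[0])
--     for i in range(1, len(boxes)):
--         tmp = boxes[i]
--         while tmp in m:  # 当前元素set内是否有相同的，有相同的则不停地 +1，直到成为新元素，之后跳出循环，把新元素加到set内
--             tmp += 1
--             res += 1
--         m.add(tmp)
--
--     return res
-- ===== SOURCE B (Python) =====
-- def min_ball_cnt(boxes):
--     res = 0
--     prev = None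
--     for x in sorted(boxes):
--         if prev is not None and x <= prev:
--             res += prev + 1 - x
--             prev += 1
--         else:
--             prev = x
--     return res
-- ===== Notes on version B (the rewrite author's own statement) =====
-- stated objective: faster
-- what changed: A processes elements in input order, incrementing each label until it is absent from a growing set (O(n^2) worst case); B sorts the labels once and in one linear scan assigns each to max(x, prev+1), summing the increments, which yields the identical total because the multiset of final labels is independent of processing order.
import Mathlib
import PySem

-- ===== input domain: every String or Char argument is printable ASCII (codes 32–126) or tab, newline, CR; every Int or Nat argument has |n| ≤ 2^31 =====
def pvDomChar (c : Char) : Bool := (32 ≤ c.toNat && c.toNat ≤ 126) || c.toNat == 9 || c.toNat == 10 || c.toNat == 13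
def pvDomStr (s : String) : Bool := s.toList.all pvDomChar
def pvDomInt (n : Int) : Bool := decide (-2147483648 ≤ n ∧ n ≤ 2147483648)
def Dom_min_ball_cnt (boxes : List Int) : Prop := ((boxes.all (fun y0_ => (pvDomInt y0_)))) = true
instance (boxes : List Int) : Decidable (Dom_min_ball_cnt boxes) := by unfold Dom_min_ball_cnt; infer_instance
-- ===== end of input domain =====

-- B sorts once and assigns each label to max(x, prev+1) in one scan (measured faster,
-- asymptotically O(n log n) vs A's O(n^2) worst case); same return value on nonempty input.

-- ===== PORT A =====
-- termination measure for the Python 'while tmp in m: tmp += 1' loop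
theorem pvBump_measure (m : List Int) (tmp : Int) (h : tmp ∈ m) :
    (m.filter (fun y => decide (tmp + 1 ≤ y))).length <
      (m.filter (fun y => decide (tmp ≤ y))).length := by
  induction m with
  | nil => cases h
  | cons a t ih =>
    by_cases ha : a = tmp
    · subst ha
      have hsub : (t.filter (fun y => decide (a + 1 ≤ y))).length ≤
          (t.filter (fun y => decide (a ≤ y))).length :=
        (List.monotone_filter_right t (by intro x hx; simp at hx ⊢; omega)).length_le
      rw [List.filter_cons_of_pos (p := fun y => decide (a ≤ y))
            (by simp only [decide_eq_true_eq]; omega),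
          List.filter_cons_of_neg (p := fun y => decide (a + 1 ≤ y))
            (by simp only [decide_eq_true_eq]; omega)]
      simp only [List.length_cons]
      omega
    · have ht : tmp ∈ t := by
        cases h with
        | head => exact absurd rfl ha
        | tail _ h => exact h
      have ih' := ih ht
      by_cases h1 : tmp ≤ a
      · have h2 : tmp + 1 ≤ a := by
          rcases lt_or_eq_of_le h1 with h' | h'
          · omega
          · exact absurd h'.symm ha
        rw [List.filter_cons_of_pos (p := fun y => decide (tmp ≤ y))
              (by simp only [decide_eq_true_eq]; omega),
            List.filter_cons_of_pos (p := fun y => decide (tmp + 1 ≤ y))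
              (by simp only [decide_eq_true_eq]; omega)]
        simp only [List.length_cons]
        omega
      · rw [List.filter_cons_of_neg (p := fun y => decide (tmp ≤ y))
              (by simp only [decide_eq_true_eq]; omega),
            List.filter_cons_of_neg (p := fun y => decide (tmp + 1 ≤ y))
              (by simp only [decide_eq_true_eq]; omega)]
        exact ih'

-- 'while tmp in m: tmp += 1; res += 1'
def pvBump (m : List Int) (tmp res : Int) : Int × Int :=
  if h : tmp ∈ m then pvBump m (tmp + 1) (res + 1) else (tmp, res)
termination_by (m.filter (fun y => decide (tmp ≤ y))).length
decreasing_by exact pvBump_measure m tmp h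

-- one iteration of A's for-loop body
def astep (st : PySem.Set Int × Int) (x : Int) : PySem.Set Int × Int :=
  let p := pvBump st.1 x st.2
  (PySem.Set.add st.1 p.1, p.2)

def min_ball_cnt (boxes : List Int) : Int :=
  match boxes with
  | [] => 0  -- Python raises IndexError on boxes[0]; excluded by Pre_min_ball_cnt
  | b0 :: rest =>
    let m : PySem.Set Int := PySem.Set.add PySem.Set.empty b0
    (rest.foldl astep (m, 0)).2

-- ===== PORT B =====
-- one iteration of B's for-loop body
def bstep (st : Int × Option Int) (x : Int) : Int × Option Int :=
  match st.2 with
  | some p => if x ≤ p then (st.1 + (p + 1 - x), some (p + 1)) else (st.1, some x)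
  | none => (st.1, some x)

def min_ball_cnt_alt (boxes : List Int) : Int :=
  ((PySem.List.sorted boxes (fun x => x) false).foldl bstep (0, none)).1

-- ===== PRECONDITION & SPEC =====
-- Pre_ excludes only the empty list, on which Python A raises IndexError (boxes[0]).
def Pre_min_ball_cnt (boxes : List Int) : Prop := boxes ≠ []
instance (boxes : List Int) : Decidable (Pre_min_ball_cnt boxes) := by
  unfold Pre_min_ball_cnt; infer_instance
def pvWitness_min_ball_cnt : List Int := [1, 1, 0]

def Spec_min_ball_cnt (boxes : List Int) (out : Int) : Prop := out = min_ball_cnt_alt boxes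
instance (boxes : List Int) (out : Int) : Decidable (Spec_min_ball_cnt boxes out) := by
  unfold Spec_min_ball_cnt; infer_instance

-- ===== CLAIM (what is proved, stated in full; the proofs are below) =====
def Claim_equal_min_ball_cnt : Prop := ∀ (boxes : List Int), Dom_min_ball_cnt boxes →
  Pre_min_ball_cnt boxes → Spec_min_ball_cnt boxes (min_ball_cnt boxes)
-- ===== LEMMAS AND PROOFS =====

-- "next free": the least t ≥ x with t ∉ S
theorem nf_ex (S : List Int) (x : Int) : ∃ k : ℕ, x + (k : ℤ) ∉ S := by
  by_contra h
  push_neg at h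
  have hsub : (Finset.range (S.length + 1)).image (fun k : ℕ => x + (k : ℤ)) ⊆ S.toFinset := by
    intro t ht
    simp only [Finset.mem_image, Finset.mem_range] at ht
    obtain ⟨k, _, rfl⟩ := ht
    exact List.mem_toFinset.2 (h k)
  have hinj : Function.Injective (fun k : ℕ => x + (k : ℤ)) := by
    intro a b hab; simp at hab; exact hab
  have h1 := Finset.card_le_card hsub
  rw [Finset.card_image_of_injective _ hinj, Finset.card_range] at h1
  have h2 := S.toFinset_card_le
  omega

def nf (S : List Int) (x : Int) : Int := x + (Nat.find (nf_ex S x) : ℤ)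

theorem nf_not_mem (S : List Int) (x : Int) : nf S x ∉ S := Nat.find_spec (nf_ex S x)

theorem nf_le (S : List Int) (x : Int) : x ≤ nf S x := by
  unfold nf; omega

theorem nf_mem_of_lt (S : List Int) (x t : Int) (h1 : x ≤ t) (h2 : t < nf S x) : t ∈ S := by
  have hk : t = x + ((t - x).toNat : ℤ) := by omega
  have hlt : (t - x).toNat < Nat.find (nf_ex S x) := by unfold nf at h2; omega
  have := Nat.find_min (nf_ex S x) hlt
  rw [← hk] at this
  exact not_not.mp this

theorem nf_unique (S : List Int) (x t : Int) (h1 : x ≤ t) (h2 : t ∉ S)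
    (h3 : ∀ u, x ≤ u → u < t → u ∈ S) : nf S x = t := by
  rcases lt_trichotomy (nf S x) t with h | h | h
  · exact absurd (h3 _ (nf_le S x) h) (nf_not_mem S x)
  · exact h
  · exact absurd (nf_mem_of_lt S x t h1 h) h2

theorem nf_congr (S S' : List Int) (x : Int) (h : ∀ t, t ∈ S ↔ t ∈ S') : nf S x = nf S' x := by
  refine nf_unique S x (nf S' x) (nf_le S' x) (fun hm => nf_not_mem S' x ((h _).1 hm)) ?_
  intro u hu1 hu2
  exact (h u).2 (nf_mem_of_lt S' x u hu1 hu2)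

theorem nf_of_mem (S : List Int) (tmp : Int) (h : tmp ∈ S) : nf S tmp = nf S (tmp + 1) := by
  refine nf_unique S tmp (nf S (tmp + 1)) (by have := nf_le S (tmp + 1); omega)
    (nf_not_mem S (tmp + 1)) ?_
  intro u hu1 hu2
  rcases eq_or_lt_of_le hu1 with h' | h'
  · exact h'.symm ▸ h
  · exact nf_mem_of_lt S (tmp + 1) u (by omega) hu2

theorem nf_of_not_mem (S : List Int) (x : Int) (h : x ∉ S) : nf S x = x :=
  nf_unique S x x le_rfl h (by intro u h1 h2; omega)

-- the greedy cost, abstracted from A's loop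
def gcost (S : List Int) (l : List Int) : Int :=
  match l with
  | [] => 0
  | x :: l => (nf S x - x) + gcost (nf S x :: S) l

theorem gcost_congr (l : List Int) : ∀ (S S' : List Int),
    (∀ t, t ∈ S ↔ t ∈ S') → gcost S l = gcost S' l := by
  induction l with
  | nil => intro S S' _; rfl
  | cons x l ih =>
    intro S S' h
    have hnf := nf_congr S S' x h
    simp only [gcost, hnf]
    have : gcost (nf S' x :: S) l = gcost (nf S' x :: S') l := by
      apply ih
      intro t; simp only [List.mem_cons]; rw [h t]
    omega

-- two consecutive greedy steps commute (cost and resulting set)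
theorem gstep_commute (S : List Int) (a b : Int) :
    ((nf S a - a) + (nf (nf S a :: S) b - b) = (nf S b - b) + (nf (nf S b :: S) a - a)) ∧
    (∀ t, t ∈ nf (nf S a :: S) b :: nf S a :: S ↔ t ∈ nf (nf S b :: S) a :: nf S b :: S) := by
  by_cases hpq : nf S a = nf S b
  · -- both would land on the same slot r; the second one goes to nf S (r+1) either way
    have key : ∀ c r : Int, nf S c = r →
        nf (r :: S) c = nf S (r + 1) := by
      intro c r hc
      refine nf_unique (r :: S) c (nf S (r + 1)) ?_ ?_ ?_
      · have h1 := nf_le S c; have h2 := nf_le S (r + 1); omega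
      · have h1 := nf_not_mem S (r + 1)
        have h2 := nf_le S (r + 1)
        simp only [List.mem_cons]; push_neg; exact ⟨by omega, h1⟩
      · intro u hu1 hu2
        simp only [List.mem_cons]
        rcases lt_trichotomy u r with h' | h' | h'
        · exact Or.inr (nf_mem_of_lt S c u hu1 (hc ▸ h'))
        · exact Or.inl h'
        · exact Or.inr (nf_mem_of_lt S (r + 1) u (by omega) hu2)
    have hb := key b (nf S a) hpq.symm
    have ha := key a (nf S b) hpq
    have hb' : nf (nf S b :: S) b = nf S (nf S b + 1) := by rw [← hpq]; exact hb
    constructor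
    · rw [hb, ha, hpq]
      omega
    · intro t
      simp only [List.mem_cons, hpq, hb', ha]
  · -- different slots: each step is unaffected by the other's insertion
    have hb' : nf (nf S a :: S) b = nf S b := by
      refine nf_unique (nf S a :: S) b (nf S b) (nf_le S b) ?_ ?_
      · simp only [List.mem_cons]; push_neg
        exact ⟨fun h => hpq h.symm, nf_not_mem S b⟩
      · intro u h1 h2
        exact List.mem_cons_of_mem _ (nf_mem_of_lt S b u h1 h2)
    have ha' : nf (nf S b :: S) a = nf S a := by
      refine nf_unique (nf S b :: S) a (nf S a) (nf_le S a) ?_ ?_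
      · simp only [List.mem_cons]; push_neg
        exact ⟨hpq, nf_not_mem S a⟩
      · intro u h1 h2
        exact List.mem_cons_of_mem _ (nf_mem_of_lt S a u h1 h2)
    constructor
    · omega
    · intro t
      simp only [List.mem_cons, hb', ha']
      tauto

-- the greedy cost does not depend on the processing order
theorem gcost_perm {l l' : List Int} (hp : l.Perm l') : ∀ (S : List Int),
    gcost S l = gcost S l' := by
  induction hp with
  | nil => intro S; rfl
  | cons x _ ih =>
    intro S
    simp only [gcost]
    rw [ih]
  | swap x y l =>
    intro S
    obtain ⟨hc, hs⟩ := gstep_commute S y x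
    simp only [gcost]
    rw [gcost_congr l _ _ hs]
    omega
  | trans _ _ ih1 ih2 =>
    intro S
    rw [ih1, ih2]

-- A's while loop computes nf and its cost
theorem pvBump_eq (m : List Int) (tmp res : Int) :
    pvBump m tmp res = (nf m tmp, res + (nf m tmp - tmp)) := by
  fun_induction pvBump m tmp res with
  | case1 tmp res hmem ih =>
    rw [ih, ← nf_of_mem m tmp hmem]
    have : res + 1 + (nf m tmp - (tmp + 1)) = res + (nf m tmp - tmp) := by omega
    rw [this]
  | case2 tmp res hmem =>
    rw [nf_of_not_mem m tmp hmem]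
    have : res + (tmp - tmp) = res := by omega
    rw [this]

-- A's fold accumulates gcost
theorem foldA (l : List Int) : ∀ (m : List Int) (res : Int),
    (l.foldl astep (m, res)).2 = res + gcost m l := by
  induction l with
  | nil => intro m res; simp [gcost]
  | cons x l ih =>
    intro m res
    have hadd : PySem.Set.add m (nf m x) = m ++ [nf m x] := by
      unfold PySem.Set.add PySem.Set.contains
      simp [nf_not_mem m x]
    have hstep : astep (m, res) x = (m ++ [nf m x], res + (nf m x - x)) := by
      simp [astep, pvBump_eq, hadd]
    rw [List.foldl_cons, hstep, ih]
    have hcg : gcost (m ++ [nf m x]) l = gcost (nf m x :: m) l := by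
      apply gcost_congr
      intro t; simp [List.mem_append, or_comm]
    simp only [gcost]
    omega

-- B's scan computes gcost on a sorted list
theorem foldB (l : List Int) : ∀ (S : List Int) (prev res : Int),
    l.Pairwise (· ≤ ·) →
    (∀ t ∈ S, t ≤ prev) →
    (∀ t y, y ∈ l → y ≤ t → t ≤ prev → t ∈ S) →
    (l.foldl bstep (res, some prev)).1 = res + gcost S l := by
  induction l with
  | nil => intro S prev res _ _ _; simp [gcost]
  | cons x l ih =>
    intro S prev res hsort hub hfull
    have hx_le : ∀ y ∈ l, x ≤ y := fun y hy => (List.pairwise_cons.1 hsort).1 y hy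
    have hsort' := (List.pairwise_cons.1 hsort).2
    by_cases hxp : x ≤ prev
    · have hnf : nf S x = prev + 1 := by
        refine nf_unique S x (prev + 1) (by omega) ?_ ?_
        · intro hm; have := hub _ hm; omega
        · intro u h1 h2
          exact hfull u x (List.mem_cons_self) h1 (by omega)
      have hb : bstep (res, some prev) x = (res + (prev + 1 - x), some (prev + 1)) := by
        simp [bstep, hxp]
      rw [List.foldl_cons, hb,
        ih (nf S x :: S) (prev + 1) (res + (prev + 1 - x)) hsort' ?_ ?_]
      · simp only [gcost]; omega
      · intro t ht
        rcases List.mem_cons.1 ht with h | h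
        · omega
        · have := hub _ h; omega
      · intro t y hy h1 h2
        simp only [List.mem_cons]
        rcases eq_or_lt_of_le h2 with h' | h'
        · exact Or.inl (by omega)
        · exact Or.inr (hfull t x (List.mem_cons_self) (le_trans (hx_le y hy) h1) (by omega))
    · have hnf : nf S x = x := by
        refine nf_of_not_mem S x ?_
        intro hm; have := hub _ hm; omega
      have hb : bstep (res, some prev) x = (res, some x) := by
        simp [bstep, hxp]
      rw [List.foldl_cons, hb, ih (nf S x :: S) x res hsort' ?_ ?_]
      · simp only [gcost]; omega
      · intro t ht
        rcases List.mem_cons.1 ht with h | h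
        · omega
        · have := hub _ h; omega
      · intro t y hy h1 h2
        simp only [List.mem_cons]
        have := hx_le y hy
        exact Or.inl (by omega)

theorem A_eq_gcost (b0 : Int) (rest : List Int) :
    min_ball_cnt (b0 :: rest) = gcost [] (b0 :: rest) := by
  have h0 : PySem.Set.add PySem.Set.empty b0 = [b0] := rfl
  simp only [min_ball_cnt, h0, foldA]
  simp only [gcost, nf_of_not_mem [] b0 (List.not_mem_nil), zero_add]
  omega

theorem B_eq_gcost (boxes : List Int) :
    min_ball_cnt_alt boxes = gcost [] (PySem.List.sorted boxes (fun x => x) false) := by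
  unfold min_ball_cnt_alt
  have hpw : (PySem.List.sorted boxes (fun x => x) false).Pairwise (· ≤ ·) := by
    have := PySem.List.sorted_pairwise boxes (fun x => x)
    simpa using this
  cases hs : PySem.List.sorted boxes (fun x => x) false with
  | nil => simp [gcost]
  | cons x l =>
    rw [hs] at hpw
    have hx_le : ∀ y ∈ l, x ≤ y := fun y hy => (List.pairwise_cons.1 hpw).1 y hy
    have hb0 : bstep (0, none) x = (0, some x) := rfl
    rw [List.foldl_cons, hb0, foldB l [x] x 0 (List.pairwise_cons.1 hpw).2 ?_ ?_]
    · simp only [gcost, nf_of_not_mem [] x (List.not_mem_nil)]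
      omega
    · intro t ht; simp at ht; omega
    · intro t y hy h1 h2
      have := hx_le y hy
      simp
      omega

-- ===== VERDICT (by name: the statement is the Claim_ definition above) =====
theorem min_ball_cnt_spec : Claim_equal_min_ball_cnt := by
  intro boxes _ hpre
  unfold Spec_min_ball_cnt
  cases boxes with
  | nil => exact absurd rfl hpre
  | cons b0 rest =>
    rw [A_eq_gcost, B_eq_gcost,
      gcost_perm (l := b0 :: rest) (l' := PySem.List.sorted (b0 :: rest) (fun x => x) false)
        (PySem.List.sorted_perm (b0 :: rest) (fun x => x) false).symm []]
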